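-- pv_equiv track=rewrite | github.com/physicxs/racingAI | track_intelligence.py | detect_corner_phases
-- ===== SOURCE A (Python) =====
-- def detect_corner_phases(curvature, corner_ids, num_corners):
--     """Assign entry/apex/exit phase to each corner point.
--
--     Returns phases[i] = 'entry' | 'apex' | 'exit' | 'straight'.
--     """
--     n = len(curvature)
--     phases = ['straight'] * n
--
--     for cid in range(num_corners):
--         # Collect indices for this corner
--         indices = [i for i in range(n) if corner_ids[i] == cid]
--         if not indices:
--             continue
--
--         # Find apex = index of max |curvature|
--         apex_idx = max(indices, key=lambda i: abs(curvature[i]))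
--
--         for i in indices:
--             if i < apex_idx:
--                 phases[i] = 'entry'
--             elif i == apex_idx:
--                 phases[i] = 'apex'
--             else:
--                 phases[i] = 'exit'
--
--     return phases
-- ===== SOURCE B (Python) =====
-- def detect_corner_phases(curvature, corner_ids, num_corners):
--     """Assign entry/apex/exit phase to each corner point.
--
--     One pass over the points: track, per valid corner id, the first index of
--     maximal |curvature| (the apex); then label each point by comparing its
--     index with its corner's apex.  O(n) instead of O(num_corners * n).
--     """
--     n = len(curvature)
--     apex = {}  # cid -> (apex index, |curvature| there)
--     for i, (c, cid) in enumerate(zip(curvature, corner_ids)):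
--         if 0 <= cid < num_corners:
--             m = abs(c)
--             if cid not in apex or m > apex[cid][1]:
--                 apex[cid] = (i, m)
--     phases = ['straight'] * n
--     for i, cid in enumerate(corner_ids[:n]):
--         if cid in apex:
--             a = apex[cid][0]
--             phases[i] = 'entry' if i < a else ('apex' if i == a else 'exit')
--     return phases
-- ===== Notes on version B (the rewrite author's own statement) =====
-- stated objective: faster
-- what changed: A rescans all n points once per corner id (O(num_corners*n)); B makes one grouping pass that keeps the per-corner apex (first index of max |curvature|) in a dict and then labels each point in a second single pass, O(n).
import Mathlib
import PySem

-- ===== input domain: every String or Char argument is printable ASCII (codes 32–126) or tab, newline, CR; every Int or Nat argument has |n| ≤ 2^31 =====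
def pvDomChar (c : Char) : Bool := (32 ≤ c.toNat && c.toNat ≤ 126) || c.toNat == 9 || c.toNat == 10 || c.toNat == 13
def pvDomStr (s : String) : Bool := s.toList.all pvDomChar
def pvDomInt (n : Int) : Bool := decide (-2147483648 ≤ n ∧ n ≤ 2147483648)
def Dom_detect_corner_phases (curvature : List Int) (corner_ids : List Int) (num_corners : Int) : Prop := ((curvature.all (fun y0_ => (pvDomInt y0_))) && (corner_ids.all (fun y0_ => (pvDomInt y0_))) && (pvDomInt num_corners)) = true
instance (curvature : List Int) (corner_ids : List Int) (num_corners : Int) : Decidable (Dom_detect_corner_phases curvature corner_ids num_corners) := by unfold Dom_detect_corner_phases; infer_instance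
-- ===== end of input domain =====

-- B replaces A's scan of all points once per corner id by a single grouping pass
-- (per-corner apex kept in a dict), O(n + num_corners·n) → O(n); objective: faster.

-- ===== PORT A =====
def detect_corner_phases (curvature : List Int) (corner_ids : List Int) (num_corners : Int) : List String :=
  (PySem.List.pyRange 0 num_corners).foldl (fun phases cid =>
      let indices := (PySem.List.pyRange 0 (curvature.length : Int)).filter
        (fun i => PySem.List.pyGetD corner_ids i 0 == cid)
      -- 'if not indices: continue' then 'max(indices, key=…)': max? is none exactly on the empty list.
      -- pyGetD (default 0) stands for corner_ids[i]/curvature[i]: exact under Pre_, where i is in range.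
      match PySem.List.max? indices (fun i => |PySem.List.pyGetD curvature i 0|) with
      | none => phases
      | some apex_idx =>
          indices.foldl (fun ph i =>
            ph.set i.toNat (if i < apex_idx then "entry" else if i = apex_idx then "apex" else "exit")) phases)
    (List.replicate curvature.length "straight")

-- ===== PORT B =====
def detect_corner_phases_alt (curvature : List Int) (corner_ids : List Int) (num_corners : Int) : List String :=
  let apex : PySem.Dict Int (Int × Int) :=
    (PySem.List.enumerate (curvature.zip corner_ids)).foldl (fun d (p : Int × Int × Int) =>
      if 0 ≤ p.2.2 ∧ p.2.2 < num_corners then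
        match PySem.Dict.get? d p.2.2 with
        | none => d.insert p.2.2 (p.1, |p.2.1|)
        | some pr => if pr.2 < |p.2.1| then d.insert p.2.2 (p.1, |p.2.1|) else d
      else d) PySem.Dict.empty
  (PySem.List.enumerate (corner_ids.take curvature.length)).foldl (fun ph p =>
      match PySem.Dict.get? apex p.2 with
      | none => ph
      | some pr => ph.set p.1.toNat (if p.1 < pr.1 then "entry" else if p.1 = pr.1 then "apex" else "exit"))
    (List.replicate curvature.length "straight")

-- ===== PRECONDITION & SPEC =====
-- Pre_ excludes exactly the inputs where A raises IndexError: num_corners > 0 with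
-- corner_ids shorter than curvature (the comprehension reads corner_ids[i] for every i < len(curvature)).
def Pre_detect_corner_phases (curvature : List Int) (corner_ids : List Int) (num_corners : Int) : Prop :=
  curvature.length ≤ corner_ids.length ∨ num_corners ≤ 0
instance (curvature : List Int) (corner_ids : List Int) (num_corners : Int) : Decidable (Pre_detect_corner_phases curvature corner_ids num_corners) := by unfold Pre_detect_corner_phases; infer_instance
def pvWitness_detect_corner_phases : List Int × List Int × Int := ([1, -3, 2, 0, 5, 1], [0, 0, 0, 1, 1, -1], 2)

def Spec_detect_corner_phases (curvature : List Int) (corner_ids : List Int) (num_corners : Int) (out : List String) : Prop := out = detect_corner_phases_alt curvature corner_ids num_corners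
instance (curvature : List Int) (corner_ids : List Int) (num_corners : Int) (out : List String) : Decidable (Spec_detect_corner_phases curvature corner_ids num_corners out) := by unfold Spec_detect_corner_phases; infer_instance

-- ===== CLAIM (what is proved, stated in full; the proofs are below) =====
def Claim_equal_detect_corner_phases : Prop := ∀ (curvature : List Int) (corner_ids : List Int) (num_corners : Int), Dom_detect_corner_phases curvature corner_ids num_corners → Pre_detect_corner_phases curvature corner_ids num_corners → Spec_detect_corner_phases curvature corner_ids num_corners (detect_corner_phases curvature corner_ids num_corners)

-- ===== LEMMAS AND PROOFS =====

-- left-biased "max by key" merge of two optional candidates (first argument wins ties)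
def pvMerge {α : Type} (k : α → Int) : Option α → Option α → Option α
  | none, b => b
  | some a, none => some a
  | some a, some b => if k a < k b then some b else some a

-- B's best-candidate-per-corner, read off the enumerated point list
def pvBest (nc cid : Int) : List (Int × Int × Int) → Option (Int × Int)
  | [] => none
  | p :: rest =>
      if p.2.2 = cid ∧ 0 ≤ cid ∧ cid < nc then
        pvMerge (fun pr => pr.2) (some (p.1, |p.2.1|)) (pvBest nc cid rest)
      else pvBest nc cid rest

-- A's per-corner index list and apex
def pvIdxs (curvature corner_ids : List Int) (cid : Int) : List Int :=
  (PySem.List.pyRange 0 (curvature.length : Int)).filter (fun i => PySem.List.pyGetD corner_ids i 0 == cid)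
def pvApexA (curvature corner_ids : List Int) (cid : Int) : Option Int :=
  PySem.List.max? (pvIdxs curvature corner_ids cid) (fun i => |PySem.List.pyGetD curvature i 0|)
def pvPhase (i a : Int) : String := if i < a then "entry" else if i = a then "apex" else "exit"

theorem pvMerge_none_right {α : Type} (k : α → Int) (a : Option α) : pvMerge k a none = a := by
  cases a <;> rfl

theorem pvMerge_assoc {α : Type} (k : α → Int) (a b c : Option α) :
    pvMerge k (pvMerge k a b) c = pvMerge k a (pvMerge k b c) := by
  cases a <;> cases b <;> cases c <;>
    first
      | rfl
      | (simp only [pvMerge] <;> split_ifs <;>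
          simp only [pvMerge] <;> split_ifs <;>
          first | rfl | (exfalso; omega))

theorem pv_max?_eq (key : Int → Int) (l : List Int) :
    PySem.List.max? l key = l.foldl (fun acc x => pvMerge key acc (some x)) none := by
  unfold PySem.List.max?
  congr 1
  funext acc x
  cases acc <;> rfl

theorem pv_mfoldl_out (key : Int → Int) (t : List Int) (a : Option Int) :
    t.foldl (fun acc x => pvMerge key acc (some x)) a =
      pvMerge key a (t.foldl (fun acc x => pvMerge key acc (some x)) none) := by
  induction t generalizing a with
  | nil => simp [pvMerge_none_right]
  | cons y t ih =>
      simp only [List.foldl_cons]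
      rw [ih (pvMerge key a (some y)), pvMerge_assoc, ← ih (some y)]
      rfl

theorem pv_max?_cons (key : Int → Int) (x : Int) (t : List Int) :
    PySem.List.max? (x :: t) key = pvMerge key (some x) (PySem.List.max? t key) := by
  rw [pv_max?_eq, pv_max?_eq, List.foldl_cons]
  exact pv_mfoldl_out key t (pvMerge key none (some x))


theorem pvBest_invalid (nc cid : Int) (h : ¬ (0 ≤ cid ∧ cid < nc)) :
    ∀ pts : List (Int × Int × Int), pvBest nc cid pts = none := by
  intro pts
  induction pts with
  | nil => rfl
  | cons p rest ih =>
      simp only [pvBest]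
      rw [if_neg (by tauto), ih]

theorem pv_enum_eq {α : Type} (d : α) :
    ∀ (xs : List α) (s : Int), PySem.List.enumerate xs s =
      (List.range xs.length).map (fun (k : Nat) => (s + (k : Int), xs.getD k d)) := by
  intro xs
  induction xs with
  | nil => intro s; rfl
  | cons x xs ih =>
      intro s
      show (s, x) :: PySem.List.enumerate xs (s + 1) = _
      rw [ih (s + 1)]
      simp only [List.length_cons, List.range_succ_eq_map, List.map_cons, List.map_map]
      refine congrArg₂ _ (by simp [List.getD]) ?_
      apply List.map_congr_left
      intro k _
      simp only [Function.comp_apply, Nat.succ_eq_add_one, List.getD, List.getElem?_cons_succ]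
      refine congrArg₂ _ ?_ rfl
      push_cast
      ring

theorem pv_setfold (g : Int → String) (idx : List Int) (hpos : ∀ i ∈ idx, 0 ≤ i) :
    ∀ (ph : List String) (j : Nat),
      (idx.foldl (fun ph i => ph.set i.toNat (g i)) ph)[j]? =
        if (j : Int) ∈ idx ∧ j < ph.length then some (g (j : Int)) else ph[j]? := by
  induction idx with
  | nil => intro ph j; simp
  | cons i idx ih =>
      intro ph j
      have hi : 0 ≤ i := hpos i (by simp)
      have hpos' : ∀ x ∈ idx, 0 ≤ x := fun x hx => hpos x (by simp [hx])
      simp only [List.foldl_cons]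
      rw [ih hpos' (ph.set i.toNat (g i)) j]
      by_cases hj : (j : Int) ∈ idx
      · by_cases hl : j < ph.length <;>
          simp [hj, hl, List.length_set]
      · by_cases he : i = (j : Int)
        · have ht : i.toNat = j := by omega
          rw [List.getElem?_set, if_pos ht]
          have hm : (j : Int) ∈ i :: idx := by simp [he]
          by_cases hl : j < ph.length
          · simp [hm, hl, List.length_set, hj, he]
          · simp only [List.length_set, hj, false_and, if_false, hm, hl, and_false]
            rw [if_neg (by omega : ¬ i.toNat < ph.length), List.getElem?_eq_none (by omega)]
        · have ht : i.toNat ≠ j := by omega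
          have hm : ¬ ((j : Int) = i) := fun h => he h.symm
          rw [List.getElem?_set_ne ht]
          simp [List.mem_cons, hj, hm, List.length_set]

theorem pv_len_setfold (g : Int → String) (idx : List Int) :
    ∀ ph : List String, (idx.foldl (fun ph i => ph.set i.toNat (g i)) ph).length = ph.length := by
  induction idx with
  | nil => intro ph; rfl
  | cons i idx ih => intro ph; simp [List.foldl_cons, ih, List.length_set]


theorem pv_dictfold (nc : Int) :
    ∀ (pts : List (Int × Int × Int)) (d : PySem.Dict Int (Int × Int)) (cid : Int),
      PySem.Dict.get? (pts.foldl (fun d (p : Int × Int × Int) =>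
          if 0 ≤ p.2.2 ∧ p.2.2 < nc then
            match PySem.Dict.get? d p.2.2 with
            | none => d.insert p.2.2 (p.1, |p.2.1|)
            | some pr => if pr.2 < |p.2.1| then d.insert p.2.2 (p.1, |p.2.1|) else d
          else d) d) cid
        = pvMerge (fun pr => pr.2) (PySem.Dict.get? d cid) (pvBest nc cid pts) := by
  intro pts
  induction pts with
  | nil => intro d cid; rw [List.foldl_nil, show pvBest nc cid [] = none from rfl, pvMerge_none_right]
  | cons p pts ih =>
      intro d cid
      rw [List.foldl_cons, ih]
      have hbest : pvBest nc cid (p :: pts) =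
          pvMerge (fun pr => pr.2)
            (if p.2.2 = cid ∧ 0 ≤ cid ∧ cid < nc then some (p.1, |p.2.1|) else none)
            (pvBest nc cid pts) := by
        by_cases hcond : p.2.2 = cid ∧ 0 ≤ cid ∧ cid < nc
        · simp [pvBest, hcond]
        · simp [pvBest, hcond, pvMerge]
      have key : PySem.Dict.get? (if 0 ≤ p.2.2 ∧ p.2.2 < nc then
            match PySem.Dict.get? d p.2.2 with
            | none => d.insert p.2.2 (p.1, |p.2.1|)
            | some pr => if pr.2 < |p.2.1| then d.insert p.2.2 (p.1, |p.2.1|) else d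
          else d) cid = pvMerge (fun pr => pr.2) (PySem.Dict.get? d cid)
            (if p.2.2 = cid ∧ 0 ≤ cid ∧ cid < nc then some (p.1, |p.2.1|) else none) := by
        by_cases hv : 0 ≤ p.2.2 ∧ p.2.2 < nc
        · by_cases hc : p.2.2 = cid
          · subst hc
            rw [if_pos hv, if_pos ⟨rfl, hv⟩]
            cases hg : PySem.Dict.get? d p.2.2 with
            | none => simp [PySem.Dict.get?_insert_self, pvMerge]
            | some pr =>
                by_cases hlt : pr.2 < |p.2.1| <;>
                  simp [hlt, hg, PySem.Dict.get?_insert_self, pvMerge]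
          · have hne : cid ≠ p.2.2 := fun h => hc h.symm
            rw [if_pos hv, if_neg (by tauto)]
            cases hg : PySem.Dict.get? d p.2.2 with
            | none => simp [PySem.Dict.get?_insert_of_ne _ _ hne, pvMerge_none_right]
            | some pr =>
                by_cases hlt : pr.2 < |p.2.1| <;>
                  simp [hlt, hg, PySem.Dict.get?_insert_of_ne _ _ hne, pvMerge_none_right]
        · rw [if_neg hv, if_neg (by rintro ⟨h1, h2, h3⟩; rw [← h1] at h2 h3; exact hv ⟨h2, h3⟩), pvMerge_none_right]
      rw [key, hbest, pvMerge_assoc]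


theorem pv_idxs_eq (c l : List Int) (cid : Int) :
    pvIdxs c l cid = ((List.range c.length).map (fun (k : Nat) => (k : Int))).filter
      (fun i => PySem.List.pyGetD l i 0 == cid) := by
  unfold pvIdxs
  rw [PySem.List.pyRange_zero_natCast]

theorem pv_best_map (c l : List Int) (nc cid : Int) (hv : 0 ≤ cid ∧ cid < nc) :
    ∀ ks : List Nat,
      pvBest nc cid (ks.map (fun (k : Nat) =>
          ((k : Int), (PySem.List.pyGetD c (k : Int) 0, PySem.List.pyGetD l (k : Int) 0)))) =
        (PySem.List.max? ((ks.map (fun (k : Nat) => (k : Int))).filter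
            (fun i => PySem.List.pyGetD l i 0 == cid)) (fun i => |PySem.List.pyGetD c i 0|)).map
          (fun a => (a, |PySem.List.pyGetD c a 0|)) := by
  intro ks
  induction ks with
  | nil => rfl
  | cons k ks ih =>
      rw [List.map_cons, List.map_cons, List.filter_cons]
      have hcons : pvBest nc cid (((k : Int), (PySem.List.pyGetD c (k : Int) 0, PySem.List.pyGetD l (k : Int) 0)) ::
          ks.map (fun (k : Nat) => ((k : Int), (PySem.List.pyGetD c (k : Int) 0, PySem.List.pyGetD l (k : Int) 0)))) =
          if PySem.List.pyGetD l (k : Int) 0 = cid ∧ 0 ≤ cid ∧ cid < nc then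
            pvMerge (fun pr => pr.2) (some ((k : Int), |PySem.List.pyGetD c (k : Int) 0|))
              (pvBest nc cid (ks.map (fun (k : Nat) =>
                ((k : Int), (PySem.List.pyGetD c (k : Int) 0, PySem.List.pyGetD l (k : Int) 0)))))
          else pvBest nc cid (ks.map (fun (k : Nat) =>
            ((k : Int), (PySem.List.pyGetD c (k : Int) 0, PySem.List.pyGetD l (k : Int) 0)))) := rfl
      rw [hcons]
      by_cases h : PySem.List.pyGetD l (k : Int) 0 = cid
      · rw [if_pos ⟨h, hv⟩, ih, if_pos (by simp only [h, beq_self_eq_true]), pv_max?_cons]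
        cases hm : PySem.List.max? ((ks.map (fun (k : Nat) => (k : Int))).filter
            (fun i => PySem.List.pyGetD l i 0 == cid)) (fun i => |PySem.List.pyGetD c i 0|) with
        | none => simp [pvMerge]
        | some m =>
            simp only [Option.map_some, pvMerge]
            split_ifs <;> rfl
      · rw [if_neg (fun hh => h hh.1), if_neg (by simp only [beq_iff_eq]; exact h), ih]

theorem pv_enum_zip (c l : List Int) (hlen : c.length ≤ l.length) :
    PySem.List.enumerate (c.zip l) = (List.range c.length).map (fun (k : Nat) =>
      ((k : Int), (PySem.List.pyGetD c (k : Int) 0, PySem.List.pyGetD l (k : Int) 0))) := by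
  rw [pv_enum_eq ((0 : Int), (0 : Int)) (c.zip l) 0]
  rw [List.length_zip, Nat.min_eq_left hlen]
  apply List.map_congr_left
  intro k hk
  have h1 : k < c.length := List.mem_range.mp hk
  have h2 : k < l.length := lt_of_lt_of_le h1 hlen
  have hz : (c.zip l)[k]? = some (c.getD k 0, l.getD k 0) := by
    rw [List.getElem?_zip_eq_some]
    constructor <;> simp [List.getD_eq_getElem?_getD, List.getElem?_eq_getElem, h1, h2]
  simp [List.getD_eq_getElem?_getD, hz, PySem.List.pyGetD_natCast]

theorem pv_enum_take (c l : List Int) (hlen : c.length ≤ l.length) :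
    PySem.List.enumerate (l.take c.length) = (List.range c.length).map (fun (k : Nat) =>
      ((k : Int), PySem.List.pyGetD l (k : Int) 0)) := by
  rw [pv_enum_eq (0 : Int) (l.take c.length) 0, List.length_take, Nat.min_eq_left hlen]
  apply List.map_congr_left
  intro k hk
  have h1 : k < c.length := List.mem_range.mp hk
  have h2 : k < l.length := lt_of_lt_of_le h1 hlen
  simp [List.getD_eq_getElem?_getD, List.getElem?_take, h1, h2, PySem.List.pyGetD_natCast]

theorem pv_find_range (j : Nat) : ∀ n : Nat,
    (List.range n).find? (fun k => k == j) = if j < n then some j else none := by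
  intro n
  induction n with
  | zero => simp
  | succ n ih =>
      rw [List.range_succ, List.find?_append, ih]
      by_cases h : j < n
      · rw [if_pos h, if_pos (by omega)]; rfl
      · rw [if_neg h]
        by_cases he : n = j
        · subst he; simp
        · simp only [Option.none_or, List.find?_cons, List.find?_nil]
          rw [show (n == j) = false by simp [he], if_neg (by omega)]


theorem pv_apex_get (c l : List Int) (nc : Int) (hlen : c.length ≤ l.length) (cid : Int) :
    PySem.Dict.get? ((PySem.List.enumerate (c.zip l)).foldl (fun d (p : Int × Int × Int) =>
        if 0 ≤ p.2.2 ∧ p.2.2 < nc then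
          match PySem.Dict.get? d p.2.2 with
          | none => d.insert p.2.2 (p.1, |p.2.1|)
          | some pr => if pr.2 < |p.2.1| then d.insert p.2.2 (p.1, |p.2.1|) else d
        else d) PySem.Dict.empty) cid =
      if 0 ≤ cid ∧ cid < nc then
        (pvApexA c l cid).map (fun a => (a, |PySem.List.pyGetD c a 0|))
      else none := by
  rw [pv_dictfold nc (PySem.List.enumerate (c.zip l)) PySem.Dict.empty cid]
  rw [show PySem.Dict.get? (PySem.Dict.empty (κ := Int) (ν := Int × Int)) cid = none from rfl]
  rw [show ∀ b, pvMerge (fun (pr : Int × Int) => pr.2) none b = b from fun b => rfl]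
  by_cases hv : 0 ≤ cid ∧ cid < nc
  · rw [if_pos hv, pv_enum_zip c l hlen, pv_best_map c l nc cid hv]
    unfold pvApexA
    rw [pv_idxs_eq]
  · rw [if_neg hv, pvBest_invalid nc cid hv]

theorem pv_optsetfold (f : Int × Int → Option String) (L : List (Int × Int))
    (hpos : ∀ p ∈ L, 0 ≤ p.1) (hnd : (L.map Prod.fst).Nodup) :
    ∀ (ph : List String) (j : Nat),
      (L.foldl (fun ph p => match f p with | none => ph | some s => ph.set p.1.toNat s) ph)[j]? =
        match (L.find? (fun p => p.1 == (j : Int))).bind f with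
        | none => ph[j]?
        | some s => if j < ph.length then some s else ph[j]? := by
  induction L with
  | nil => intro ph j; simp
  | cons p L ih =>
      intro ph j
      have hp0 : 0 ≤ p.1 := hpos p (by simp)
      have hpos' : ∀ q ∈ L, 0 ≤ q.1 := fun q hq => hpos q (by simp [hq])
      have hnd' : (L.map Prod.fst).Nodup := (List.nodup_cons.mp hnd).2
      simp only [List.foldl_cons, List.find?_cons]
      by_cases hp : p.1 = (j : Int)
      · rw [show (p.1 == (j : Int)) = true by simp [hp]]
        have hnone : L.find? (fun q => q.1 == (j : Int)) = none := by
          apply List.find?_eq_none.mpr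
          intro q hq
          simp only [beq_iff_eq]
          intro hqj
          exact (List.nodup_cons.mp hnd).1 (hp ▸ hqj ▸ List.mem_map_of_mem hq)
        rw [ih hpos' hnd' _ j, hnone, Option.bind_some]
        cases hf : f p with
        | none => simp
        | some s =>
            have ht : p.1.toNat = j := by omega
            rw [ht, List.getElem?_set, if_pos rfl, List.length_set]
            by_cases hl : j < ph.length
            · simp [hl]
            · simp [hl, List.getElem?_eq_none (by omega : ph.length ≤ j)]
      · rw [show (p.1 == (j : Int)) = false by simp [hp]]
        rw [ih hpos' hnd' _ j]
        have hget : (match f p with | none => ph | some s => ph.set p.1.toNat s)[j]? = ph[j]? := by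
          cases hf : f p with
          | none => rfl
          | some s => exact List.getElem?_set_ne (by omega)
        have hlen2 : (match f p with | none => ph | some s => ph.set p.1.toNat s).length = ph.length := by
          cases f p <;> simp [List.length_set]
        cases hfind : (L.find? (fun q => q.1 == (j : Int))).bind f with
        | none => simp only [hfind]; exact hget
        | some s => simp only [hfind, hlen2, hget]

theorem pv_idxs_pos (c l : List Int) (cid : Int) : ∀ i ∈ pvIdxs c l cid, 0 ≤ i := by
  intro i hi
  unfold pvIdxs at hi
  exact (PySem.List.mem_pyRange_one.mp (List.mem_filter.mp hi).1).1

theorem pv_mem_idxs (c l : List Int) (cid : Int) (j : Nat) :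
    ((j : Int) ∈ pvIdxs c l cid) ↔ (j < c.length ∧ PySem.List.pyGetD l (j : Int) 0 = cid) := by
  simp only [pvIdxs, List.mem_filter, PySem.List.mem_pyRange_one, beq_iff_eq]
  constructor
  · rintro ⟨⟨_, h2⟩, h3⟩
    exact ⟨by exact_mod_cast h2, h3⟩
  · rintro ⟨h1, h2⟩
    exact ⟨⟨Int.natCast_nonneg j, by exact_mod_cast h1⟩, h2⟩

theorem pv_stepA (c l : List Int) (cid : Int) (ph : List String) (j : Nat) :
    (match PySem.List.max? (pvIdxs c l cid) (fun i => |PySem.List.pyGetD c i 0|) with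
     | none => ph
     | some apex_idx => (pvIdxs c l cid).foldl (fun (ph : List String) (i : Int) =>
         ph.set i.toNat (if i < apex_idx then "entry" else if i = apex_idx then "apex" else "exit")) ph)[j]? =
      if (j : Int) ∈ pvIdxs c l cid ∧ j < ph.length then
        (pvApexA c l cid).map (fun a => pvPhase (j : Int) a)
      else ph[j]? := by
  cases hm : PySem.List.max? (pvIdxs c l cid) (fun i => |PySem.List.pyGetD c i 0|) with
  | none =>
      have : pvIdxs c l cid = [] := (PySem.List.max?_eq_none_iff _ _).mp hm
      simp [this]
  | some a =>
      rw [pv_setfold _ _ (pv_idxs_pos c l cid) ph j]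
      by_cases hcond : (j : Int) ∈ pvIdxs c l cid ∧ j < ph.length
      · rw [if_pos hcond, if_pos hcond]
        unfold pvApexA
        rw [hm]
        rfl
      · rw [if_neg hcond, if_neg hcond]

theorem pv_stepA_len (c l : List Int) (cid : Int) (ph : List String) :
    (match PySem.List.max? (pvIdxs c l cid) (fun i => |PySem.List.pyGetD c i 0|) with
     | none => ph
     | some apex_idx => (pvIdxs c l cid).foldl (fun (ph : List String) (i : Int) =>
         ph.set i.toNat (if i < apex_idx then "entry" else if i = apex_idx then "apex" else "exit")) ph).length
      = ph.length := by
  cases PySem.List.max? (pvIdxs c l cid) (fun i => |PySem.List.pyGetD c i 0|) with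
  | none => rfl
  | some a => exact pv_len_setfold _ _ ph

theorem pv_A_fold (c l : List Int) :
    ∀ (L : List Int), L.Nodup → ∀ (ph : List String) (j : Nat), ph.length = c.length →
      (L.foldl (fun phases cid =>
          match PySem.List.max? (pvIdxs c l cid) (fun i => |PySem.List.pyGetD c i 0|) with
          | none => phases
          | some apex_idx => (pvIdxs c l cid).foldl (fun (ph : List String) (i : Int) =>
              ph.set i.toNat (if i < apex_idx then "entry" else if i = apex_idx then "apex" else "exit")) phases) ph)[j]? =
        if PySem.List.pyGetD l (j : Int) 0 ∈ L ∧ j < c.length then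
          (pvApexA c l (PySem.List.pyGetD l (j : Int) 0)).map (fun a => pvPhase (j : Int) a)
        else ph[j]? := by
  intro L
  induction L with
  | nil => intro _ ph j _; simp
  | cons cid L ih =>
      intro hnd ph j hl
      obtain ⟨hni, hndL⟩ := List.nodup_cons.mp hnd
      rw [List.foldl_cons, ih hndL _ j (by rw [pv_stepA_len, hl])]
      by_cases hj : j < c.length
      · by_cases hc : PySem.List.pyGetD l (j : Int) 0 = cid
        · have hninL : PySem.List.pyGetD l (j : Int) 0 ∉ L := by rw [hc]; exact hni
          rw [if_neg (fun h => hninL h.1), pv_stepA]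
          have hmem : ((j : Int)) ∈ pvIdxs c l cid := (pv_mem_idxs c l cid j).mpr ⟨hj, hc⟩
          rw [if_pos ⟨hmem, by omega⟩, if_pos ⟨by rw [hc]; exact List.mem_cons_self .., hj⟩, hc]
        · by_cases hmL : PySem.List.pyGetD l (j : Int) 0 ∈ L
          · rw [if_pos ⟨hmL, hj⟩, if_pos ⟨List.mem_cons_of_mem _ hmL, hj⟩]
          · rw [if_neg (fun h => hmL h.1), pv_stepA]
            have hnmem : ((j : Int)) ∉ pvIdxs c l cid :=
              fun h => hc ((pv_mem_idxs c l cid j).mp h).2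
            rw [if_neg (fun h => hnmem h.1)]
            rw [if_neg (by
              rintro ⟨hmem', _⟩
              rcases List.mem_cons.mp hmem' with h | h
              · exact hc h
              · exact hmL h)]
      · rw [if_neg (fun h => hj h.2), if_neg (fun h => hj h.2), pv_stepA,
          if_neg (fun h => hj (hl ▸ h.2))]

theorem pv_nodup_pyRange (nc : Int) : (PySem.List.pyRange 0 nc).Nodup := by
  rw [PySem.List.pyRange_one]
  exact List.nodup_range.map (fun a b h => by omega)

-- ===== VERDICT (by name: the statement is the Claim_ definition above) =====
theorem detect_corner_phases_spec : Claim_equal_detect_corner_phases := by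
  intro c l nc _ hpre
  unfold Spec_detect_corner_phases
  rcases hpre with hlen | hnc
  · -- main case: corner_ids at least as long as curvature
    apply List.ext_getElem?
    intro j
    have hA : detect_corner_phases c l nc =
        (PySem.List.pyRange 0 nc).foldl (fun phases cid =>
          match PySem.List.max? (pvIdxs c l cid) (fun i => |PySem.List.pyGetD c i 0|) with
          | none => phases
          | some apex_idx => (pvIdxs c l cid).foldl (fun (ph : List String) (i : Int) =>
              ph.set i.toNat (if i < apex_idx then "entry" else if i = apex_idx then "apex" else "exit")) phases)
          (List.replicate c.length "straight") := rfl
    rw [hA, pv_A_fold c l (PySem.List.pyRange 0 nc) (pv_nodup_pyRange nc)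
      (List.replicate c.length "straight") j (by simp)]
    obtain ⟨D, hD⟩ : ∃ D, D = (PySem.List.enumerate (c.zip l)).foldl (fun d (p : Int × Int × Int) =>
        if 0 ≤ p.2.2 ∧ p.2.2 < nc then
          match PySem.Dict.get? d p.2.2 with
          | none => d.insert p.2.2 (p.1, |p.2.1|)
          | some pr => if pr.2 < |p.2.1| then d.insert p.2.2 (p.1, |p.2.1|) else d
        else d) PySem.Dict.empty := ⟨_, rfl⟩
    have hB : detect_corner_phases_alt c l nc =
        (PySem.List.enumerate (l.take c.length)).foldl (fun ph p =>
          match PySem.Dict.get? D p.2 with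
          | none => ph
          | some pr => ph.set p.1.toNat (if p.1 < pr.1 then "entry" else if p.1 = pr.1 then "apex" else "exit"))
          (List.replicate c.length "straight") := by rw [hD]; rfl
    have hDget : ∀ x, PySem.Dict.get? D x =
        if 0 ≤ x ∧ x < nc then (pvApexA c l x).map (fun a => (a, |PySem.List.pyGetD c a 0|)) else none := by
      intro x; rw [hD]; exact pv_apex_get c l nc hlen x
    rw [hB]
    rw [PySem.List.foldl_congr_mem _ _ (fun (ph : List String) (p : Int × Int) =>
        match ((PySem.Dict.get? D p.2).map (fun pr =>
          if p.1 < pr.1 then "entry" else if p.1 = pr.1 then "apex" else "exit") : Option String) with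
        | none => ph
        | some s => ph.set p.1.toNat s) _
      (by intro acc p _; cases hq : PySem.Dict.get? D p.2 <;> simp [hq])]
    rw [pv_enum_take c l hlen]
    have hpos : ∀ p ∈ (List.range c.length).map (fun (k : Nat) =>
        ((k : Int), PySem.List.pyGetD l (k : Int) 0)), 0 ≤ p.1 := by
      intro p hp
      obtain ⟨k, _, rfl⟩ := List.mem_map.mp hp
      exact Int.natCast_nonneg k
    have hnd : (((List.range c.length).map (fun (k : Nat) =>
        ((k : Int), PySem.List.pyGetD l (k : Int) 0))).map Prod.fst).Nodup := by
      rw [List.map_map]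
      exact List.nodup_range.map (fun a b h => by simpa using h)
    rw [pv_optsetfold _ _ hpos hnd _ j]
    rw [List.find?_map, show ((fun (p : Int × Int) => p.1 == (j : Int)) ∘ (fun (k : Nat) =>
        ((k : Int), PySem.List.pyGetD l (k : Int) 0))) = (fun k => k == j) from by
      funext k; by_cases h : k = j <;> simp [h], pv_find_range j c.length]
    by_cases hj : j < c.length
    · rw [if_pos hj]
      simp only [Option.map_some, Option.bind_some]
      rw [hDget]
      by_cases hv : 0 ≤ PySem.List.pyGetD l (j : Int) 0 ∧ PySem.List.pyGetD l (j : Int) 0 < nc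
      · rw [if_pos hv, if_pos ⟨PySem.List.mem_pyRange_one.mpr hv, hj⟩]
        cases ha : pvApexA c l (PySem.List.pyGetD l (j : Int) 0) with
        | none =>
            have hmem : ((j : Int)) ∈ pvIdxs c l (PySem.List.pyGetD l (j : Int) 0) :=
              (pv_mem_idxs c l _ j).mpr ⟨hj, rfl⟩
            have : pvIdxs c l (PySem.List.pyGetD l (j : Int) 0) = [] :=
              (PySem.List.max?_eq_none_iff _ _).mp ha
            rw [this] at hmem
            cases hmem
        | some a => simp [pvPhase, hj]
      · rw [if_neg hv, if_neg (fun h => hv (PySem.List.mem_pyRange_one.mp h.1))]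
        simp
    · rw [if_neg hj, if_neg (fun h => hj h.2)]
      simp
  · -- num_corners ≤ 0: no corner ids are valid; both sides are all-straight
    have hr : PySem.List.pyRange 0 nc = [] := by
      rw [PySem.List.pyRange_one]
      rw [show (nc - 0).toNat = 0 from by omega]
      rfl
    have hA : detect_corner_phases c l nc = List.replicate c.length "straight" := by
      unfold detect_corner_phases
      rw [hr, List.foldl_nil]
    have hd : (PySem.List.enumerate (c.zip l)).foldl (fun d (p : Int × Int × Int) =>
        if 0 ≤ p.2.2 ∧ p.2.2 < nc then
          match PySem.Dict.get? d p.2.2 with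
          | none => d.insert p.2.2 (p.1, |p.2.1|)
          | some pr => if pr.2 < |p.2.1| then d.insert p.2.2 (p.1, |p.2.1|) else d
        else d) PySem.Dict.empty = PySem.Dict.empty := by
      rw [PySem.List.foldl_congr_mem _ _ (fun (d : PySem.Dict Int (Int × Int)) (_ : Int × Int × Int) => d) _
        (by intro d p _; rw [if_neg (by omega)])]
      exact PySem.List.foldl_ignore _ _
    have hB : detect_corner_phases_alt c l nc = List.replicate c.length "straight" := by
      unfold detect_corner_phases_alt
      rw [hd]
      rw [PySem.List.foldl_congr_mem _ _ (fun (ph : List String) (_ : Int × Int) => ph) _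
        (by intro ph p _; rfl)]
      exact PySem.List.foldl_ignore _ _
    rw [hA, hB]
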